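-- pv_equiv track=rewrite | github.com/pwmcclung/practProbs | is_int.py | is_interesting_number
-- ===== SOURCE A (Python) =====
-- def is_interesting_number(number, awesome_phrases):
--     number_str = str(number)
--     if len(number_str) < 3:
--         return False
--
--     if number in awesome_phrases:
--         return True
--     if all(c == '0' for c in number_str[1:]):
--         return True
--     if all(c == number_str[0] for c in number_str):
--         return True
--     if is_sequential(number_str, 1):
--         return True
--     if is_sequential(number_str, -1):
--         return True
--     if number_str == number_str[::-1]:
--         return True
--
--     return False
--
-- def is_sequential(number_str, step):
--     for i in range(len(number_str) - 1):
--         prev = int(number_str[i])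
--         curr = int(number_str[i+1])
--         if (curr - prev) != step:
--             if step == 1 and prev == 9 and curr == 0:
--                 continue
--             elif step == -1 and prev == 1 and curr == 0:
--                 continue
--             else: return False
--     return True
-- ===== SOURCE B (Python) =====
-- def is_interesting_number(number, awesome_phrases):
--     s = str(number)
--     n = len(s)
--     if n < 3:
--         return False
--     if number in awesome_phrases:
--         return True
--     d0 = int(s[0])
--     patterns = [
--         s[0] + '0' * (n - 1),                            # zero tail
--         s[0] * n,                                        # all digits equal
--         ''.join(str((d0 + i) % 10) for i in range(n)),   # ascending, 9->0 wrap allowed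
--         ''.join(str(d0 - i) for i in range(n)),          # descending, no wrap
--         s[::-1],                                         # palindrome
--     ]
--     return s in patterns
-- ===== Notes on version B (the rewrite author's own statement) =====
-- stated objective: alternative
-- what changed: Replaces A's per-pattern predicate checks (char scans and the pairwise-difference is_sequential loop with its wrap special-cases) by constructing the five candidate pattern strings (zero-tail, all-same, ascending with %10 wrap, descending with plain decrement, reversed) and testing membership of the number's string among them.
import Mathlib
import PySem

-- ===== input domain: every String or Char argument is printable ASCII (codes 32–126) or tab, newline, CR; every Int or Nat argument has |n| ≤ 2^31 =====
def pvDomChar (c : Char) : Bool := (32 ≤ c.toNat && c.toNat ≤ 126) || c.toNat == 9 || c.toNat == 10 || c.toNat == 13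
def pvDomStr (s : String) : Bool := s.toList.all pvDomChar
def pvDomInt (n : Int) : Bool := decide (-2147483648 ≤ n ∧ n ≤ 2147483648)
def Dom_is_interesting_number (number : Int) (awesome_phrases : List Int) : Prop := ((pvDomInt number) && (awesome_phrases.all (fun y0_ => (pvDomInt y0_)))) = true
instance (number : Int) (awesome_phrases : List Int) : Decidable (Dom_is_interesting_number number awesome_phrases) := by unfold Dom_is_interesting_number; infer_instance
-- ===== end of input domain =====

-- B rewrites A's predicate checks (char scans and the pairwise is_sequential loop) as
-- build-the-five-candidate-pattern-strings-and-test-membership; equivalent on Pre_ (where A returns).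


-- ===== PORT A =====
-- int(number_str[i]) on a single char: exact for digit chars '0'..'9'; inputs whose string
-- reaches this on a non-digit char (negative numbers with ≥ 3 chars not caught earlier) make
-- Python raise ValueError and are excluded by Pre_.
def pvDigit (c : Char) : Int := (c.toNat : Int) - 48

-- the body of A's loop for one index i (prev = int(s[i]), curr = int(s[i+1]))
def pvPairOk (prev curr step : Int) : Bool :=
  if curr - prev ≠ step then
    if step = 1 ∧ prev = 9 ∧ curr = 0 then true
    else if step = -1 ∧ prev = 1 ∧ curr = 0 then true
    else false
  else true

-- A's is_sequential: the loop over i in range(len-1) as structural recursion over adjacent pairs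
def pvSeq : List Char → Int → Bool
  | c1 :: c2 :: rest, step => pvPairOk (pvDigit c1) (pvDigit c2) step && pvSeq (c2 :: rest) step
  | _, _ => true

def is_interesting_number (number : Int) (awesome_phrases : List Int) : Bool :=
  let number_str := PySem.Int.toChars number
  if number_str.length < 3 then false
  else if awesome_phrases.contains number then true
  else if (number_str.drop 1).all (fun c => c == '0') then true
  -- number_str[0]: the default of pyGetD is never used (length ≥ 3 here)
  else if number_str.all (fun c => c == PySem.List.pyGetD number_str 0 ' ') then true
  else if pvSeq number_str 1 then true
  else if pvSeq number_str (-1) then true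
  else if number_str == number_str.reverse then true
  else false

-- ===== PORT B =====
-- ''.join(str((d0 + i) % 10) for i in range(n))
def pvAsc (d : Int) (n : Nat) : List Char :=
  (List.range n).flatMap (fun i : Nat => PySem.Int.toChars (PySem.Int.mod (d + (i : Int)) 10))
-- ''.join(str(d0 - i) for i in range(n))
def pvDesc (d : Int) (n : Nat) : List Char :=
  (List.range n).flatMap (fun i : Nat => PySem.Int.toChars (d - (i : Int)))

def is_interesting_number_alt (number : Int) (awesome_phrases : List Int) : Bool :=
  let s := PySem.Int.toChars number
  let n := s.length
  if n < 3 then false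
  else if awesome_phrases.contains number then true
  else
    let h := PySem.List.pyGetD s 0 ' '  -- s[0]; default never used (n ≥ 3)
    let d0 := pvDigit h                 -- int(s[0]); exact for digit chars, see pvDigit
    let patterns : List (List Char) :=
      [h :: List.replicate (n - 1) '0',
       List.replicate n h,
       pvAsc d0 n,
       pvDesc d0 n,
       s.reverse]
    patterns.contains s

-- ===== PRECONDITION & SPEC =====
-- Pre_ excludes exactly the inputs on which A raises ValueError: number ≤ -10 whose string
-- ('-…', length ≥ 3) reaches int('-') inside is_sequential without being in awesome_phrases.
def Pre_is_interesting_number (number : Int) (awesome_phrases : List Int) : Prop :=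
  -9 ≤ number ∨ number ∈ awesome_phrases
instance (number : Int) (awesome_phrases : List Int) : Decidable (Pre_is_interesting_number number awesome_phrases) := by unfold Pre_is_interesting_number; infer_instance
def pvWitness_is_interesting_number : Int × List Int := (109, [7])

def Spec_is_interesting_number (number : Int) (awesome_phrases : List Int) (out : Bool) : Prop := out = is_interesting_number_alt number awesome_phrases
instance (number : Int) (awesome_phrases : List Int) (out : Bool) : Decidable (Spec_is_interesting_number number awesome_phrases out) := by unfold Spec_is_interesting_number; infer_instance

-- ===== CLAIM (what is proved, stated in full; the proofs are below) =====
def Claim_equal_is_interesting_number : Prop := ∀ (number : Int) (awesome_phrases : List Int), Dom_is_interesting_number number awesome_phrases → Pre_is_interesting_number number awesome_phrases → Spec_is_interesting_number number awesome_phrases (is_interesting_number number awesome_phrases)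

-- ===== LEMMAS AND PROOFS =====

def pvDigitList : List Char := ['0','1','2','3','4','5','6','7','8','9']

lemma pvAsc_succ (d : Int) (n : Nat) :
    pvAsc d (n + 1) = PySem.Int.toChars (PySem.Int.mod d 10) ++ pvAsc (d + 1) n := by
  unfold pvAsc
  rw [List.range_succ_eq_map, List.flatMap_cons, List.flatMap_map]
  congr 1
  · norm_num
  · congr 1; funext i; congr 2; push_cast; ring

lemma pvDesc_succ (d : Int) (n : Nat) :
    pvDesc d (n + 1) = PySem.Int.toChars d ++ pvDesc (d - 1) n := by
  unfold pvDesc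
  rw [List.range_succ_eq_map, List.flatMap_cons, List.flatMap_map]
  congr 1
  · norm_num
  · congr 1; funext i; congr 1; push_cast; ring

lemma pvAsc_mod (d : Int) (n : Nat) : pvAsc d n = pvAsc (PySem.Int.mod d 10) n := by
  unfold pvAsc; congr 1; funext i; congr 1
  rw [PySem.Int.mod_eq_emod_of_pos (by norm_num), PySem.Int.mod_eq_emod_of_pos (by norm_num),
      PySem.Int.mod_eq_emod_of_pos (by norm_num)]
  omega

lemma pvMod_small (d : Int) (h0 : 0 ≤ d) (h9 : d ≤ 9) : PySem.Int.mod d 10 = d := by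
  rw [PySem.Int.mod_eq_emod_of_pos (by norm_num)]; omega

lemma pairOk1 (h c : Char) (hh : h ∈ pvDigitList) (hc : c ∈ pvDigitList) :
    pvPairOk (pvDigit h) (pvDigit c) 1 = decide (pvDigit c = PySem.Int.mod (pvDigit h + 1) 10) := by
  fin_cases hh <;> fin_cases hc <;> decide

lemma pairOkNeg (h c : Char) (hh : h ∈ pvDigitList) (hc : c ∈ pvDigitList) :
    pvPairOk (pvDigit h) (pvDigit c) (-1) = decide (pvDigit c = pvDigit h - 1) := by
  fin_cases hh <;> fin_cases hc <;> decide



lemma toDigitsCore_chars : ∀ (f m : Nat) (acc : List Char), ∀ c ∈ Nat.toDigitsCore 10 f m acc,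
    c ∈ acc ∨ ∃ k, k < 10 ∧ c = Nat.digitChar k := by
  intro f
  induction f with
  | zero => intro m acc c hc; exact Or.inl hc
  | succ f ih =>
    intro m acc c hc
    simp only [Nat.toDigitsCore] at hc
    split at hc
    · rcases List.mem_cons.1 hc with h | h
      · exact Or.inr ⟨m % 10, Nat.mod_lt _ (by norm_num), h⟩
      · exact Or.inl h
    · rcases ih (m / 10) (Nat.digitChar (m % 10) :: acc) c hc with h | h
      · rcases List.mem_cons.1 h with h' | h'
        · exact Or.inr ⟨m % 10, Nat.mod_lt _ (by norm_num), h'⟩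
        · exact Or.inl h'
      · exact Or.inr h

lemma toChars_digits (number : Int) (h0 : 0 ≤ number) :
    ∀ c ∈ PySem.Int.toChars number, c ∈ pvDigitList := by
  intro c hc
  simp only [PySem.Int.toChars, if_neg (by omega : ¬ number < 0)] at hc
  rcases toDigitsCore_chars _ _ [] c hc with h | ⟨k, hk, rfl⟩
  · simp at h
  · exact (by decide : ∀ k, k < 10 → Nat.digitChar k ∈ pvDigitList) k hk

lemma toChars_len_neg (number : Int) (h1 : -9 ≤ number) (h2 : number < 0) :
    (PySem.Int.toChars number).length < 3 := by
  interval_cases number <;> decide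

lemma toChars_digit (m : Int) (h0 : 0 ≤ m) (h9 : m ≤ 9) :
    PySem.Int.toChars m = [Char.ofNat (m.toNat + 48)] := by
  interval_cases m <;> decide

lemma digit_eq_iff (c : Char) (hc : c ∈ pvDigitList) (m : Int) (h0 : 0 ≤ m) (h9 : m ≤ 9) :
    c = Char.ofNat (m.toNat + 48) ↔ pvDigit c = m := by
  interval_cases m <;> fin_cases hc <;> decide

lemma toChars_pvDigit (c : Char) (hc : c ∈ pvDigitList) :
    PySem.Int.toChars (pvDigit c) = [c] := by
  fin_cases hc <;> decide

lemma pvAsc_zero (d : Int) : pvAsc d 0 = [] := rfl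
lemma pvDesc_zero (d : Int) : pvDesc d 0 = [] := rfl
lemma dval_lb (c : Char) (hc : c ∈ pvDigitList) : 0 ≤ pvDigit c := by fin_cases hc <;> decide
lemma dval_ub (c : Char) (hc : c ∈ pvDigitList) : pvDigit c ≤ 9 := by fin_cases hc <;> decide

lemma seq1_iff : ∀ (t : List Char) (h : Char), h ∈ pvDigitList → (∀ c ∈ t, c ∈ pvDigitList) →
    (pvSeq (h :: t) 1 = true ↔ h :: t = pvAsc (pvDigit h) (t.length + 1)) := by
  intro t
  induction t with
  | nil =>
    intro h hh _
    rw [pvAsc_succ, pvMod_small _ (dval_lb h hh) (dval_ub h hh), toChars_pvDigit h hh]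
    simp [pvSeq, pvAsc_zero]
  | cons c t ih =>
    intro h hh hall
    have hc : c ∈ pvDigitList := hall c (by simp)
    have hall' : ∀ x ∈ t, x ∈ pvDigitList := fun x hx => hall x (by simp [hx])
    have hstep : pvSeq (h :: c :: t) 1 = (pvPairOk (pvDigit h) (pvDigit c) 1 && pvSeq (c :: t) 1) := rfl
    rw [hstep, show (c :: t).length = t.length + 1 from rfl, pvAsc_succ,
        pvMod_small _ (dval_lb h hh) (dval_ub h hh), toChars_pvDigit h hh,
        pairOk1 h c hh hc, pvAsc_mod (pvDigit h + 1)]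
    have hm0 : 0 ≤ PySem.Int.mod (pvDigit h + 1) 10 := PySem.Int.mod_nonneg _ (by norm_num)
    have hm9 : PySem.Int.mod (pvDigit h + 1) 10 ≤ 9 := by
      have := PySem.Int.mod_lt (pvDigit h + 1) (b := 10) (by norm_num); omega
    by_cases hpc : pvDigit c = PySem.Int.mod (pvDigit h + 1) 10
    · rw [← hpc]
      simp [ih c hc hall']
    · rw [pvAsc_succ, pvMod_small _ hm0 hm9, toChars_digit _ hm0 hm9]
      simp only [hpc, decide_false, Bool.false_and, Bool.false_eq_true, false_iff]
      intro heq
      simp only [List.cons_append, List.nil_append, List.cons_eq_cons] at heq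
      exact hpc ((digit_eq_iff c hc _ hm0 hm9).1 heq.2.1)

lemma seqm1_iff : ∀ (t : List Char) (h : Char), h ∈ pvDigitList → (∀ c ∈ t, c ∈ pvDigitList) →
    (pvSeq (h :: t) (-1) = true ↔ h :: t = pvDesc (pvDigit h) (t.length + 1)) := by
  intro t
  induction t with
  | nil =>
    intro h hh _
    rw [pvDesc_succ, toChars_pvDigit h hh]
    simp [pvSeq, pvDesc_zero]
  | cons c t ih =>
    intro h hh hall
    have hc : c ∈ pvDigitList := hall c (by simp)
    have hall' : ∀ x ∈ t, x ∈ pvDigitList := fun x hx => hall x (by simp [hx])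
    have hstep : pvSeq (h :: c :: t) (-1) = (pvPairOk (pvDigit h) (pvDigit c) (-1) && pvSeq (c :: t) (-1)) := rfl
    rw [hstep, show (c :: t).length = t.length + 1 from rfl, pvDesc_succ,
        toChars_pvDigit h hh, pairOkNeg h c hh hc]
    by_cases hpc : pvDigit c = pvDigit h - 1
    · rw [← hpc]
      simp [ih c hc hall']
    · simp only [hpc, decide_false, Bool.false_and, Bool.false_eq_true, false_iff]
      intro heq
      by_cases hneg : pvDigit h - 1 = -1
      · rw [hneg, pvDesc_succ, show PySem.Int.toChars (-1) = ['-', '1'] from by decide] at heq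
        simp only [List.cons_append, List.nil_append, List.cons_eq_cons] at heq
        have : c = '-' := heq.2.1
        rw [this] at hc
        exact absurd hc (by decide)
      · have h1 : 0 ≤ pvDigit h - 1 := by have := dval_lb h hh; omega
        have h9 : pvDigit h - 1 ≤ 9 := by have := dval_ub h hh; omega
        rw [pvDesc_succ, toChars_digit _ h1 h9] at heq
        simp only [List.cons_append, List.nil_append, List.cons_eq_cons] at heq
        exact hpc ((digit_eq_iff c hc _ h1 h9).1 heq.2.1)



lemma all_same_iff (h : Char) (t : List Char) :
    ((h :: t).all (fun c => c == h) = true) ↔ (h :: t = List.replicate (h :: t).length h) := by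
  simp [List.all_eq_true, List.eq_replicate_iff]

lemma all_zero_iff (h : Char) (t : List Char) :
    (t.all (fun c => c == '0') = true) ↔ (h :: t = h :: List.replicate ((h :: t).length - 1) '0') := by
  simp [List.all_eq_true, List.eq_replicate_iff]

-- ===== VERDICT (by name: the statement is the Claim_ definition above) =====
theorem is_interesting_number_spec : Claim_equal_is_interesting_number := by
  intro number phrases hDom hPre
  unfold Spec_is_interesting_number is_interesting_number is_interesting_number_alt
  by_cases h3 : (PySem.Int.toChars number).length < 3
  · simp only [h3, if_true]
  · simp only [h3, if_false]
    by_cases hm : phrases.contains number = true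
    · simp only [hm, if_true]
    · simp only [hm]
      have hnum : 0 ≤ number := by
        rcases hPre with hp | hp
        · by_contra hneg
          push Not at hneg
          exact h3 (toChars_len_neg number hp (by omega))
        · exact absurd (by simpa using hp) hm
      have hdig := toChars_digits number hnum
      obtain ⟨h, t, hs⟩ : ∃ h t, PySem.Int.toChars number = h :: t := by
        cases hsn : PySem.Int.toChars number with
        | nil => rw [hsn] at h3; simp at h3
        | cons a b => exact ⟨a, b, rfl⟩
      rw [hs]
      rw [hs] at hdig
      have hh : h ∈ pvDigitList := hdig h (by simp)
      have hall : ∀ c ∈ t, c ∈ pvDigitList := fun c hc => hdig c (by simp [hc])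
      have hget : PySem.List.pyGetD (h :: t) 0 ' ' = h := by simp [pysem]
      rw [hget]
      rw [Bool.eq_iff_iff]
      simp only [List.drop_succ_cons, List.drop_zero, Bool.if_true_left, Bool.or_eq_true,
        List.contains_eq_mem, List.mem_cons, List.not_mem_nil, or_false, decide_eq_true_eq, beq_iff_eq, Bool.false_eq_true]
      rw [all_zero_iff h t, all_same_iff h t,
          seq1_iff t h hh hall, seqm1_iff t h hh hall,
          show t.length + 1 = (h :: t).length from rfl]
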